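-- pv_equiv track=rewrite | github.com/TeamOfWeekend/py_algorithm | py_algorithm/myapp/algo_binary_watch.py | getMinuteByNum
-- ===== SOURCE A (Python) =====
-- def getMinuteByNum(num):
--     base_minutes = [1, 2, 4, 8, 16, 32]
--     res_minutes = []
--     if num > 5:
--         return None
--     elif 0 == num:
--         return [0]
--     elif 1 == num:
--         return base_minutes
--     elif 2 == num:
--         for i in range(0, len(base_minutes)):
--             for j in range(i+1, len(base_minutes)):
--                 minute_calc = base_minutes[i] + base_minutes[j]
--                 if minute_calc > 59:
--                     continue
--                 res_minutes.append(minute_calc)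
--         #return [3, 5, 9, 17, 33, 6, 10, 18, 34, 12, 20, 36, 24, 40, 48]
--     elif 3 == num:
--         for i in range(0, len(base_minutes)):
--             for j in range(i+1, len(base_minutes)):
--                 for k in range(j + 1, len(base_minutes)):
--                     minute_calc = base_minutes[i] + base_minutes[j] + base_minutes[k]
--                     if minute_calc > 59:
--                         continue
--                     res_minutes.append(minute_calc)
--         #return [7, 11, 19, 35, 13, 21, 37, 25, 41, 49, 14, 22, 38, 26, 42, 50, 28, 44, 52, 56]
--     elif 4 == num:
--         for i in range(0, len(base_minutes)):
--             for j in range(i+1, len(base_minutes)):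
--                 for k in range(j + 1, len(base_minutes)):
--                     for m in range(k + 1, len(base_minutes)):
--                         minute_calc = base_minutes[i] + base_minutes[j] + base_minutes[k] + base_minutes[m]
--                         if minute_calc > 59:
--                             continue
--                         res_minutes.append(minute_calc)
--         #return [15, 23, 39, 27, 43, 51, 29, 45, 53, 57, 30, 46, 54, 58]
--     elif 5 == num:
--         for i in range(0, len(base_minutes)):
--             for j in range(i+1, len(base_minutes)):
--                 for k in range(j + 1, len(base_minutes)):
--                     for m in range(k + 1, len(base_minutes)):
--                         for n in range(m + 1, len(base_minutes)):
--                             minute_calc = base_minutes[i] + base_minutes[j] + base_minutes[k] + base_minutes[m] \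
--                                           + base_minutes[n]
--                             if minute_calc > 59:
--                                 continue
--                             res_minutes.append(minute_calc)
--         #return [31, 47, 55, 59]
--
--     return res_minutes
-- ===== SOURCE B (Python) =====
-- def getMinuteByNum(num):
--     if num > 5:
--         return None
--     if num < 0:
--         return []
--
--     def combos(k, xs):
--         if k == 0:
--             return [[]]
--         if not xs:
--             return []
--         head, rest = xs[0], xs[1:]
--         return [[head] + c for c in combos(k - 1, rest)] + combos(k, rest)
--
--     return [s for s in (sum(c) for c in combos(num, [1, 2, 4, 8, 16, 32])) if s <= 59]
-- ===== Notes on version B (the rewrite author's own statement) =====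
-- stated objective: simpler
-- what changed: Replaces the five hand-unrolled nested-loop branches (depths one to five) and the two special-cased early returns with one parametrized recursive combinations enumeration whose sums are filtered once.
import Mathlib
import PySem

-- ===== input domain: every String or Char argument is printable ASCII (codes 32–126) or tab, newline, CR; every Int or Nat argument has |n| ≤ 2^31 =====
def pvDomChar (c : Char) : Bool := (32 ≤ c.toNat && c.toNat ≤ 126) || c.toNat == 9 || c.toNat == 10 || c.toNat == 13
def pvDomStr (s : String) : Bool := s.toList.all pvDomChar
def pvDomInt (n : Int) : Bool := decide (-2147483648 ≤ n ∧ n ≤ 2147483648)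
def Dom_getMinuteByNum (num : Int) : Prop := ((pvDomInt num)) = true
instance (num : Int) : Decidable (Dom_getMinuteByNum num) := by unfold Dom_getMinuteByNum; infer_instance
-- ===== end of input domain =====

-- B replaces A's five hand-unrolled nested-loop branches with one parametrized
-- recursive combinations enumeration (objective: simpler).

-- ===== PORT A =====
def getMinuteByNum (num : Int) : Option (List Int) :=
  let base : List Int := [1, 2, 4, 8, 16, 32]
  let n : Int := base.length
  if num > 5 then none
  else if num = 0 then some [0]
  else if num = 1 then some base
  else if num = 2 then
    some <| (PySem.List.pyRange 0 n 1).foldl (fun acc i =>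
      (PySem.List.pyRange (i+1) n 1).foldl (fun acc j =>
        let m := PySem.List.pyGetD base i 0 + PySem.List.pyGetD base j 0
        if m > 59 then acc else acc ++ [m]) acc) []
  else if num = 3 then
    some <| (PySem.List.pyRange 0 n 1).foldl (fun acc i =>
      (PySem.List.pyRange (i+1) n 1).foldl (fun acc j =>
        (PySem.List.pyRange (j+1) n 1).foldl (fun acc k =>
          let m := PySem.List.pyGetD base i 0 + PySem.List.pyGetD base j 0 + PySem.List.pyGetD base k 0
          if m > 59 then acc else acc ++ [m]) acc) acc) []
  else if num = 4 then
    some <| (PySem.List.pyRange 0 n 1).foldl (fun acc i =>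
      (PySem.List.pyRange (i+1) n 1).foldl (fun acc j =>
        (PySem.List.pyRange (j+1) n 1).foldl (fun acc k =>
          (PySem.List.pyRange (k+1) n 1).foldl (fun acc m' =>
            let m := PySem.List.pyGetD base i 0 + PySem.List.pyGetD base j 0 + PySem.List.pyGetD base k 0 + PySem.List.pyGetD base m' 0
            if m > 59 then acc else acc ++ [m]) acc) acc) acc) []
  else if num = 5 then
    some <| (PySem.List.pyRange 0 n 1).foldl (fun acc i =>
      (PySem.List.pyRange (i+1) n 1).foldl (fun acc j =>
        (PySem.List.pyRange (j+1) n 1).foldl (fun acc k =>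
          (PySem.List.pyRange (k+1) n 1).foldl (fun acc m' =>
            (PySem.List.pyRange (m'+1) n 1).foldl (fun acc n' =>
              let m := PySem.List.pyGetD base i 0 + PySem.List.pyGetD base j 0 + PySem.List.pyGetD base k 0 + PySem.List.pyGetD base m' 0 + PySem.List.pyGetD base n' 0
              if m > 59 then acc else acc ++ [m]) acc) acc) acc) acc) []
  else some []

-- ===== PORT B =====
def pvCombos (k : Nat) (xs : List Int) : List (List Int) :=
  match k, xs with
  | 0, _ => [[]]
  | _ + 1, [] => []
  | k + 1, x :: rest => (pvCombos k rest).map (x :: ·) ++ pvCombos (k + 1) rest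

def getMinuteByNum_alt (num : Int) : Option (List Int) :=
  if num > 5 then none
  else if num < 0 then some []
  else some ((((pvCombos num.toNat [1, 2, 4, 8, 16, 32]).map (·.sum)).filter (· ≤ 59)))

-- ===== PRECONDITION & SPEC =====
def Spec_getMinuteByNum (num : Int) (out : Option (List Int)) : Prop := out = getMinuteByNum_alt num
instance (num : Int) (out : Option (List Int)) : Decidable (Spec_getMinuteByNum num out) := by unfold Spec_getMinuteByNum; infer_instance

-- ===== CLAIM (what is proved, stated in full; the proofs are below) =====
def Claim_equal_getMinuteByNum : Prop := ∀ (num : Int), Dom_getMinuteByNum num → Spec_getMinuteByNum num (getMinuteByNum num)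

-- ===== LEMMAS AND PROOFS =====
theorem pv_neg_case (num : Int) (hn : num < 0) :
    getMinuteByNum num = getMinuteByNum_alt num := by
  unfold getMinuteByNum getMinuteByNum_alt
  have h5 : ¬ num > 5 := by omega
  simp only [if_neg h5, if_pos hn,
    if_neg (by omega : ¬ num = 0), if_neg (by omega : ¬ num = 1),
    if_neg (by omega : ¬ num = 2), if_neg (by omega : ¬ num = 3),
    if_neg (by omega : ¬ num = 4), if_neg (by omega : ¬ num = 5)]

-- ===== VERDICT (by name: the statement is the Claim_ definition above) =====
theorem getMinuteByNum_spec : Claim_equal_getMinuteByNum := by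
  intro num _
  unfold Spec_getMinuteByNum
  by_cases h5 : num > 5
  · unfold getMinuteByNum getMinuteByNum_alt
    simp [if_pos h5]
  · rcases lt_or_ge num 0 with hn | hp
    · exact pv_neg_case num hn
    · interval_cases num <;> decide
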